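-- pv_equiv track=rewrite | github.com/vanngoh/flooded-cave | flooded_cave.py | flooding_map
-- ===== SOURCE A (Python) =====
-- def flooding_map(map, steps):
--     new_map = []
--     is_fully_flooded = False
--
--     # Deep copy the map
--     for row in map:
--         new_map.append(row[:])
--
--     # Simulate the flooding
--     for i, row in enumerate(map):
--         for j, col in enumerate(row):
--             if col != 2:
--                 continue
--
--             # First row
--             if i == 0:
--                 if j-1 >= 0:
--                     new_map[i][j-1] = 2 if map[i][j-1] == 0 else map[i][j-1]
--                 if j+1 < len(row):
--                     new_map[i][j+1] = 2 if map[i][j+1] == 0 else map[i][j+1]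
--                 new_map[i+1][j] = 2 if map[i+1][j] == 0 else map[i+1][j]
--             # Last row
--             elif i == len(map) - 1:
--                 new_map[i-1][j] = 2 if map[i-1][j] == 0 else map[i-1][j]
--                 if j-1 >= 0:
--                     new_map[i][j-1] = 2 if map[i][j-1] == 0 else map[i][j-1]
--                 if j+1 < len(row):
--                     new_map[i][j+1] = 2 if map[i][j+1] == 0 else map[i][j+1]
--             # Middle rows
--             else:
--                 new_map[i-1][j] = 2 if map[i-1][j] == 0 else map[i-1][j]
--                 if j-1 >= 0:
--                     new_map[i][j-1] = 2 if map[i][j-1] == 0 else map[i][j-1]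
--                 if j+1 < len(row):
--                     new_map[i][j+1] = 2 if map[i][j+1] == 0 else map[i][j+1]
--                 new_map[i+1][j] = 2 if map[i+1][j] == 0 else map[i+1][j]
--
--     if new_map[len(map)-1][-1] == 2:
--         is_fully_flooded = True
--     else:
--         steps += 1
--
--     # Flood is stopped somehow
--     if new_map == map:
--         is_fully_flooded = True
--         steps = 0
--
--     return (new_map, steps, is_fully_flooded)
-- ===== SOURCE B (Python) =====
-- def flooding_map(map, steps):
--     n = len(map)
--
--     def flooded(i, j):
--         return 0 <= i < n and 0 <= j < len(map[i]) and map[i][j] == 2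
--
--     # Gather pass: each cell looks at its own orthogonal neighbours in the
--     # ORIGINAL map, so all updates are simultaneous.
--     new_map = [[2 if c == 0 and (flooded(i - 1, j) or flooded(i + 1, j)
--                                  or flooded(i, j - 1) or flooded(i, j + 1)) else c
--                 for j, c in enumerate(row)]
--                for i, row in enumerate(map)]
--
--     if new_map[n - 1][-1] == 2:
--         is_fully_flooded = True
--     else:
--         is_fully_flooded = False
--         steps += 1
--
--     if new_map == map:
--         return (new_map, 0, True)
--     return (new_map, steps, is_fully_flooded)
-- ===== Notes on version B (the rewrite author's own statement) =====
-- stated objective: simpler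
-- what changed: A scatters: every flooded cell pushes value 2 into its neighbours via three row-position branches mutating a copied grid; B gathers: it builds new_map cell-by-cell in one comprehension, setting a cell to 2 iff it is 0 and some bounds-checked orthogonal neighbour of the original map is 2.
import Mathlib
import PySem

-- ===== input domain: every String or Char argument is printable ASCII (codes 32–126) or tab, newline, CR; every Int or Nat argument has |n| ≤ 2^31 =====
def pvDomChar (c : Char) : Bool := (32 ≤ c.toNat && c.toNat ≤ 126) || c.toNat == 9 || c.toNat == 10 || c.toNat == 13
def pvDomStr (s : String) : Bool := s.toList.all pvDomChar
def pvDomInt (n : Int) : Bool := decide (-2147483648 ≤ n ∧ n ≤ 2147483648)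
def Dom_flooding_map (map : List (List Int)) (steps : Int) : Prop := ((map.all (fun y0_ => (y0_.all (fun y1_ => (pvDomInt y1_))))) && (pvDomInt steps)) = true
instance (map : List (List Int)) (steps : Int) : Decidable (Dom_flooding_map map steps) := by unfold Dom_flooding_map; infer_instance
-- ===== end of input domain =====

-- B replaces A's scatter pass (each flooded cell pushes into its neighbours, with three
-- row-position branches) by a single gather pass building new_map cell by cell; simpler.
-- ===== PORT A =====

-- `2 if map[a][b] == 0 else map[a][b]`
def pvValA (m : List (List Int)) (a b : Int) : Int :=
  let c := PySem.List.pyGetD (PySem.List.pyGetD m a []) b 0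
  if c = 0 then 2 else c

-- `new_map[a][b] = v`
def pvWriteA (m : List (List Int)) (nm : List (List Int)) (a b : Int) : List (List Int) :=
  PySem.List.pySetD nm a (PySem.List.pySetD (PySem.List.pyGetD nm a []) b (pvValA m a b))

-- loop body of A for one flooded source cell (i, j) (after the `col != 2: continue` guard)
def pvStepA (m : List (List Int)) (nm : List (List Int)) (i j : Int) : List (List Int) :=
  let row := PySem.List.pyGetD m i []
  if i = 0 then
    let nm1 := if 0 ≤ j - 1 then pvWriteA m nm i (j - 1) else nm
    let nm2 := if j + 1 < PySem.List.len row then pvWriteA m nm1 i (j + 1) else nm1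
    pvWriteA m nm2 (i + 1) j
  else if i = PySem.List.len m - 1 then
    let nm1 := pvWriteA m nm (i - 1) j
    let nm2 := if 0 ≤ j - 1 then pvWriteA m nm1 i (j - 1) else nm1
    if j + 1 < PySem.List.len row then pvWriteA m nm2 i (j + 1) else nm2
  else
    let nm1 := pvWriteA m nm (i - 1) j
    let nm2 := if 0 ≤ j - 1 then pvWriteA m nm1 i (j - 1) else nm1
    let nm3 := if j + 1 < PySem.List.len row then pvWriteA m nm2 i (j + 1) else nm2
    pvWriteA m nm3 (i + 1) j

def flooding_map (map : List (List Int)) (steps : Int) : List (List Int) × Int × Bool :=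
  -- deep copy of the map
  let new_map := map.foldl (fun acc row => acc ++ [row]) []
  -- simulate the flooding
  let new_map := (PySem.List.enumerate map).foldl (fun acc ir =>
    (PySem.List.enumerate ir.2).foldl (fun acc2 jc =>
      if jc.2 ≠ 2 then acc2 else pvStepA map acc2 ir.1 jc.1) acc) new_map
  -- new_map[len(map)-1][-1] == 2 ?
  let flooded := PySem.List.pyGetD (PySem.List.pyGetD new_map (PySem.List.len map - 1) []) (-1) 0 == 2
  let steps := if flooded then steps else steps + 1
  if new_map = map then (new_map, 0, true) else (new_map, steps, flooded)

-- ===== PORT B =====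

-- `0 <= i < n and 0 <= j < len(map[i]) and map[i][j] == 2`
def pvFlooded (m : List (List Int)) (i j : Int) : Bool :=
  decide (0 ≤ i) && decide (i < PySem.List.len m) &&
    (let row := PySem.List.pyGetD m i []
     decide (0 ≤ j) && decide (j < PySem.List.len row) && (PySem.List.pyGetD row j 0 == 2))

def flooding_map_alt (map : List (List Int)) (steps : Int) : List (List Int) × Int × Bool :=
  let new_map := (PySem.List.enumerate map).map (fun ir =>
    (PySem.List.enumerate ir.2).map (fun jc =>
      if (jc.2 == 0) && (pvFlooded map (ir.1 - 1) jc.1 || pvFlooded map (ir.1 + 1) jc.1 ||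
                         pvFlooded map ir.1 (jc.1 - 1) || pvFlooded map ir.1 (jc.1 + 1))
      then 2 else jc.2))
  let flooded := PySem.List.pyGetD (PySem.List.pyGetD new_map (PySem.List.len map - 1) []) (-1) 0 == 2
  let steps := if flooded then steps else steps + 1
  if new_map = map then (new_map, 0, true) else (new_map, steps, flooded)

-- ===== PRECONDITION & SPEC =====
-- Pre_ excludes exactly the inputs on which Python A raises IndexError: the empty map, an
-- empty last row, and maps where some flooded cell's unguarded vertical write lands outside
-- the grid (missing row below, or a too-short row above/below).
def Pre_flooding_map (map : List (List Int)) (steps : Int) : Prop :=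
  map ≠ [] ∧ map.getD (map.length - 1) [] ≠ [] ∧
  (∀ i < map.length, ∀ j < (map.getD i []).length,
    (map.getD i []).getD j 0 = 2 →
      ((i = 0 ∨ i + 1 < map.length) → i + 1 < map.length ∧ j < (map.getD (i + 1) []).length)) ∧
  (∀ i < map.length, ∀ j < (map.getD i []).length,
    (map.getD i []).getD j 0 = 2 → i ≠ 0 → j < (map.getD (i - 1) []).length)
instance (map : List (List Int)) (steps : Int) : Decidable (Pre_flooding_map map steps) := by
  unfold Pre_flooding_map
  refine @instDecidableAnd _ _ ?_ (@instDecidableAnd _ _ ?_ (@instDecidableAnd _ _ ?_ ?_)) <;> infer_instance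
def pvWitness_flooding_map : List (List Int) × Int := ([[2, 0], [0, 1]], 3)

def Spec_flooding_map (map : List (List Int)) (steps : Int) (out : List (List Int) × Int × Bool) : Prop := out = flooding_map_alt map steps
instance (map : List (List Int)) (steps : Int) (out : List (List Int) × Int × Bool) : Decidable (Spec_flooding_map map steps out) := by unfold Spec_flooding_map; infer_instance

-- ===== CLAIM (what is proved, stated in full; the proofs are below) =====
def Claim_equal_flooding_map : Prop := ∀ (map : List (List Int)) (steps : Int), Dom_flooding_map map steps → Pre_flooding_map map steps → Spec_flooding_map map steps (flooding_map map steps)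

-- ===== LEMMAS AND PROOFS =====

lemma pvGetD_set {α : Type} (l : List α) (i : Nat) (x d : α) (j : Nat) :
    (l.set i x).getD j d = if i = j ∧ i < l.length then x else l.getD j d := by
  rw [List.getD_eq_getElem?_getD, List.getElem?_set]
  by_cases hij : i = j
  · subst hij
    by_cases hl : i < l.length <;> simp [hl, List.getD_eq_getElem?_getD]
  · simp [hij, List.getD_eq_getElem?_getD]

def pvCell (nm : List (List Int)) (p q : Nat) : Int := (nm.getD p []).getD q 0

def pvValN (m : List (List Int)) (p q : Nat) : Int :=
  if pvCell m p q = 0 then 2 else pvCell m p q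

lemma pvCell_writeA (m nm : List (List Int)) (a b p q : Nat) :
    pvCell (pvWriteA m nm (a : Int) (b : Int)) p q =
      if p = a ∧ q = b ∧ a < nm.length ∧ b < (nm.getD a []).length then pvValN m a b
      else pvCell nm p q := by
  have hv : pvValA m (a : Int) (b : Int) = pvValN m a b := by
    simp [pvValA, pvValN, pvCell, PySem.List.pyGetD_natCast]
  unfold pvWriteA pvCell
  rw [hv]
  simp only [PySem.List.pySetD_natCast, PySem.List.pyGetD_natCast]
  rw [pvGetD_set]
  by_cases h1 : a = p ∧ a < nm.length
  · rw [if_pos h1, pvGetD_set]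
    by_cases h2 : b = q ∧ b < (nm.getD a []).length
    · rw [if_pos h2, if_pos ⟨h1.1.symm, h2.1.symm, h1.2, h2.2⟩]
    · rw [if_neg h2, if_neg (by rintro ⟨-, hqb, -, hbl⟩; exact h2 ⟨hqb.symm, hbl⟩), h1.1]
  · rw [if_neg h1, if_neg (by rintro ⟨hpa, -, hal, -⟩; exact h1 ⟨hpa.symm, hal⟩)]

lemma pvLen_writeA (m nm : List (List Int)) (a b : Int) :
    (pvWriteA m nm a b).length = nm.length := by
  unfold pvWriteA
  rw [PySem.List.length_pySetD]

lemma pvRowLen_writeA (m nm : List (List Int)) (a b p : Nat) :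
    ((pvWriteA m nm (a:Int) (b:Int)).getD p []).length = (nm.getD p []).length := by
  unfold pvWriteA
  simp only [PySem.List.pySetD_natCast, PySem.List.pyGetD_natCast]
  rw [pvGetD_set]
  split_ifs with h
  · rw [List.length_set, ← h.1]
  · rfl

def pvShape (m nm : List (List Int)) : Prop :=
  nm.length = m.length ∧ ∀ p : Nat, (nm.getD p []).length = (m.getD p []).length

def pvFA (m : List (List Int)) (acc : List (List Int)) (x : Int × Int × Int) : List (List Int) :=
  if x.2.2 ≠ 2 then acc else pvStepA m acc x.1 x.2.1

def pvCW (m nm : List (List Int)) (g : Bool) (a b : Nat) : List (List Int) :=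
  if g then pvWriteA m nm (a : Int) (b : Int) else nm

def pvStepN (m nm : List (List Int)) (ip jp : Nat) : List (List Int) :=
  if ip = 0 then
    pvWriteA m
      (pvCW m (pvCW m nm (decide (1 ≤ jp)) ip (jp - 1))
        (decide (jp + 1 < (m.getD ip []).length)) ip (jp + 1))
      ((ip + 1 : Nat) : Int) (jp : Int)
  else if ip + 1 = m.length then
    pvCW m
      (pvCW m (pvWriteA m nm ((ip - 1 : Nat) : Int) (jp : Int)) (decide (1 ≤ jp)) ip (jp - 1))
      (decide (jp + 1 < (m.getD ip []).length)) ip (jp + 1)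
  else
    pvWriteA m
      (pvCW m
        (pvCW m (pvWriteA m nm ((ip - 1 : Nat) : Int) (jp : Int)) (decide (1 ≤ jp)) ip (jp - 1))
        (decide (jp + 1 < (m.getD ip []).length)) ip (jp + 1))
      ((ip + 1 : Nat) : Int) (jp : Int)

lemma pvStepA_cast (m nm : List (List Int)) (ip jp : Nat) :
    pvStepA m nm (ip : Int) (jp : Int) = pvStepN m nm ip jp := by
  have hrow : PySem.List.pyGetD m (ip : Int) ([] : List Int) = m.getD ip [] :=
    PySem.List.pyGetD_natCast ..
  have hlr : PySem.List.len (m.getD ip []) = ((m.getD ip []).length : Int) := by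
    simp [PySem.List.len_eq]
  have hlm : PySem.List.len m = (m.length : Int) := by simp [PySem.List.len_eq]
  have e1 : ((ip : Int)) + 1 = ((ip + 1 : Nat) : Int) := by push_cast; ring
  have ej2 : ((jp : Int)) + 1 = ((jp + 1 : Nat) : Int) := by push_cast; ring
  simp only [pvStepA, pvStepN]
  rw [hrow, hlr, hlm]
  by_cases g1 : 1 ≤ jp
  all_goals by_cases g2 : jp + 1 < (m.getD ip []).length
  all_goals try have ej : ((jp : Int)) - 1 = ((jp - 1 : Nat) : Int) := by omega
  all_goals by_cases h0 : ip = 0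
  all_goals by_cases hl : ip + 1 = m.length
  all_goals (
    first
      | rw [if_pos (show ((ip : Int)) = 0 by omega), if_pos h0]
      | (rw [if_neg (show ¬ ((ip : Int)) = 0 by omega), if_neg h0]
         first
          | rw [if_pos (show ((ip : Int)) = (m.length : Int) - 1 by omega), if_pos hl]
          | rw [if_neg (show ¬ ((ip : Int)) = (m.length : Int) - 1 by omega), if_neg hl])
    first
      | rw [if_pos (show ((jp : Int)) + 1 < ((m.getD ip []).length : Int) by omega)]
      | rw [if_neg (show ¬ (((jp : Int)) + 1 < ((m.getD ip []).length : Int)) by omega)]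
    first
      | rw [if_pos (show (0 : Int) ≤ ((jp : Int)) - 1 by omega)]
      | rw [if_neg (show ¬ ((0 : Int) ≤ ((jp : Int)) - 1) by omega)]
    simp only [pvCW, e1, ej2]
    try simp only [ej]
    try simp only [show ((ip : Int)) - 1 = ((ip - 1 : Nat) : Int) from by omega]
    first
      | rw [decide_eq_true g1]
      | rw [decide_eq_false g1]
    first
      | rw [decide_eq_true g2]
      | rw [decide_eq_false g2]
    simp)

lemma pvLen_cw (m nm : List (List Int)) (g : Bool) (a b : Nat) :
    (pvCW m nm g a b).length = nm.length := by
  unfold pvCW; split_ifs <;> simp [pvLen_writeA]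

lemma pvRowLen_cw (m nm : List (List Int)) (g : Bool) (a b p : Nat) :
    ((pvCW m nm g a b).getD p []).length = ((nm.getD p []).length) := by
  unfold pvCW; split_ifs <;> first | rfl | exact pvRowLen_writeA ..

lemma pvCell_cw (m nm : List (List Int)) (g : Bool) (a b p q : Nat) :
    pvCell (pvCW m nm g a b) p q =
      if g = true ∧ p = a ∧ q = b ∧ a < nm.length ∧ b < (nm.getD a []).length then pvValN m a b
      else pvCell nm p q := by
  unfold pvCW
  cases g
  · simp
  · simp [pvCell_writeA]

def pvHits (m : List (List Int)) (ip jp : Nat) (c : Int) (p q : Nat) : Bool :=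
  c == 2 && decide (p < m.length) && decide (q < (m.getD p []).length) &&
  (if ip = 0 then
     (decide (1 ≤ jp) && p == ip && q + 1 == jp)
       || (decide (jp + 1 < (m.getD ip []).length) && p == ip && q == jp + 1)
       || (p == ip + 1 && q == jp)
   else if ip + 1 = m.length then
     (p + 1 == ip && q == jp)
       || (decide (1 ≤ jp) && p == ip && q + 1 == jp)
       || (decide (jp + 1 < (m.getD ip []).length) && p == ip && q == jp + 1)
   else
     (p + 1 == ip && q == jp)
       || (decide (1 ≤ jp) && p == ip && q + 1 == jp)
       || (decide (jp + 1 < (m.getD ip []).length) && p == ip && q == jp + 1)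
       || (p == ip + 1 && q == jp))

lemma pvIf_chain3 {A : Type} (C1 C2 C3 : Prop) [Decidable C1] [Decidable C2] [Decidable C3]
    (v v1 v2 v3 e : A) (h1 : C1 → v1 = v) (h2 : C2 → v2 = v) (h3 : C3 → v3 = v) :
    (if C1 then v1 else if C2 then v2 else if C3 then v3 else e) =
      if C1 ∨ C2 ∨ C3 then v else e := by
  split_ifs <;> tauto

lemma pvIf_chain4 {A : Type} (C1 C2 C3 C4 : Prop) [Decidable C1] [Decidable C2] [Decidable C3]
    [Decidable C4] (v v1 v2 v3 v4 e : A) (h1 : C1 → v1 = v) (h2 : C2 → v2 = v)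
    (h3 : C3 → v3 = v) (h4 : C4 → v4 = v) :
    (if C1 then v1 else if C2 then v2 else if C3 then v3 else if C4 then v4 else e) =
      if C1 ∨ C2 ∨ C3 ∨ C4 then v else e := by
  split_ifs <;> tauto

lemma pvCell_stepN (m nm : List (List Int)) (ip jp : Nat) (p q : Nat)
    (hsh : pvShape m nm) :
    pvCell (pvStepN m nm ip jp) p q =
      if pvHits m ip jp 2 p q then pvValN m p q else pvCell nm p q := by
  obtain ⟨hl, hrl⟩ := hsh
  unfold pvStepN pvHits
  by_cases h0 : ip = 0
  · rw [if_pos h0, if_pos h0]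
    rw [pvCell_writeA]
    simp only [pvLen_cw, pvRowLen_cw, pvCell_cw, hl, hrl, decide_eq_true_eq]
    rw [pvIf_chain3 _ _ _ (pvValN m p q) _ _ _ _
      (fun h => by rw [h.1, h.2.1]) (fun h => by rw [h.2.1, h.2.2.1]) (fun h => by rw [h.2.1, h.2.2.1])]
    simp only [Bool.and_eq_true, Bool.or_eq_true, decide_eq_true_eq, beq_iff_eq]
    refine if_congr ?_ rfl rfl
    constructor
    · rintro (⟨rfl, rfl, h3, h4⟩ | ⟨g, rfl, rfl, h3, h4⟩ | ⟨g, rfl, rfl, h3, h4⟩) <;>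
        exact ⟨⟨⟨trivial, by omega⟩, by omega⟩, by omega⟩
    · rintro ⟨⟨⟨-, hpn⟩, hqn⟩, (⟨⟨g, rfl⟩, hq⟩ | ⟨⟨g, rfl⟩, hq⟩ | ⟨rfl, hq⟩)⟩ <;> omega
  · rw [if_neg h0, if_neg h0]
    by_cases hlast : ip + 1 = m.length
    · rw [if_pos hlast, if_pos hlast]
      simp only [pvLen_cw, pvRowLen_cw, pvCell_cw, pvCell_writeA, pvLen_writeA, pvRowLen_writeA,
        hl, hrl, decide_eq_true_eq]
      rw [pvIf_chain3 _ _ _ (pvValN m p q) _ _ _ _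
        (fun h => by rw [h.2.1, h.2.2.1]) (fun h => by rw [h.2.1, h.2.2.1]) (fun h => by rw [h.1, h.2.1])]
      simp only [Bool.and_eq_true, Bool.or_eq_true, decide_eq_true_eq, beq_iff_eq]
      refine if_congr ?_ rfl rfl
      constructor
      · rintro (⟨g, rfl, rfl, h3, h4⟩ | ⟨g, rfl, rfl, h3, h4⟩ | ⟨rfl, rfl, h3, h4⟩) <;>
          exact ⟨⟨⟨trivial, by omega⟩, by omega⟩, by omega⟩
      · rintro ⟨⟨⟨-, hpn⟩, hqn⟩, ((⟨hp, hq⟩ | ⟨⟨g, hp⟩, hq⟩) | ⟨⟨g, hp⟩, hq⟩)⟩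
        · obtain rfl : ip = p + 1 := by omega
          simp only [Nat.add_sub_cancel] at *
          exact Or.inr (Or.inr ⟨trivial, hq, hpn, by omega⟩)
        · subst hp; omega
        · subst hp; omega
    · rw [if_neg hlast, if_neg hlast]
      simp only [pvLen_cw, pvRowLen_cw, pvCell_cw, pvCell_writeA, pvLen_writeA, pvRowLen_writeA,
        hl, hrl, decide_eq_true_eq]
      rw [pvIf_chain4 _ _ _ _ (pvValN m p q) _ _ _ _ _
        (fun h => by rw [h.1, h.2.1]) (fun h => by rw [h.2.1, h.2.2.1])
        (fun h => by rw [h.2.1, h.2.2.1]) (fun h => by rw [h.1, h.2.1])]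
      simp only [Bool.and_eq_true, Bool.or_eq_true, decide_eq_true_eq, beq_iff_eq]
      refine if_congr ?_ rfl rfl
      constructor
      · rintro (⟨rfl, rfl, h3, h4⟩ | ⟨g, rfl, rfl, h3, h4⟩ | ⟨g, rfl, rfl, h3, h4⟩ | ⟨rfl, rfl, h3, h4⟩) <;>
          exact ⟨⟨⟨trivial, by omega⟩, by omega⟩, by omega⟩
      · rintro ⟨⟨⟨-, hpn⟩, hqn⟩, (((⟨hp, hq⟩ | ⟨⟨g, hp⟩, hq⟩) | ⟨⟨g, hp⟩, hq⟩) | ⟨hp, hq⟩)⟩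
        · obtain rfl : ip = p + 1 := by omega
          simp only [Nat.add_sub_cancel] at *
          refine Or.inr (Or.inr (Or.inr ⟨?_, hq, hpn, ?_⟩)) <;> first | trivial | omega
        · subst hp; omega
        · subst hp; omega
        · subst hp; omega

lemma pvShape_stepN (m nm : List (List Int)) (ip jp : Nat) (h : pvShape m nm) :
    pvShape m (pvStepN m nm ip jp) := by
  obtain ⟨hl, hrl⟩ := h
  constructor
  · unfold pvStepN
    split_ifs <;> simp only [pvLen_writeA, pvLen_cw, hl]
  · intro p
    unfold pvStepN
    split_ifs <;> simp only [pvRowLen_writeA, pvRowLen_cw, hrl p]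

def pvHitsI (m : List (List Int)) (x : Int × Int × Int) (p q : Nat) : Bool :=
  pvHits m x.1.toNat x.2.1.toNat x.2.2 p q

lemma pvHits_ne (m : List (List Int)) (ip jp : Nat) (c : Int) (p q : Nat) (hc : c ≠ 2) :
    pvHits m ip jp c p q = false := by
  unfold pvHits
  simp [hc]

lemma pvFA_cast (m nm : List (List Int)) (ip jp : Nat) (c : Int) :
    pvFA m nm ((ip : Int), (jp : Int), c) = if c = 2 then pvStepN m nm ip jp else nm := by
  unfold pvFA
  by_cases hc : c = 2
  · simp [hc, pvStepA_cast]
  · simp [hc]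

lemma pvShape_fA (m nm : List (List Int)) (ip jp : Nat) (c : Int) (h : pvShape m nm) :
    pvShape m (pvFA m nm ((ip : Int), (jp : Int), c)) := by
  rw [pvFA_cast]
  split_ifs
  · exact pvShape_stepN m nm ip jp h
  · exact h

lemma pvCell_fA (m nm : List (List Int)) (ip jp : Nat) (c : Int) (p q : Nat)
    (h : pvShape m nm) :
    pvCell (pvFA m nm ((ip : Int), (jp : Int), c)) p q =
      if pvHits m ip jp c p q then pvValN m p q else pvCell nm p q := by
  rw [pvFA_cast]
  by_cases hc : c = 2
  · subst hc; rw [if_pos rfl, pvCell_stepN m nm ip jp p q h]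
  · rw [if_neg hc, pvHits_ne m ip jp c p q hc]; simp

lemma pvCell_foldA (m : List (List Int)) (L : List (Int × Int × Int)) (nm : List (List Int))
    (hsh : pvShape m nm) (hL : ∀ x ∈ L, 0 ≤ x.1 ∧ 0 ≤ x.2.1) (p q : Nat) :
    pvCell (L.foldl (pvFA m) nm) p q =
      if L.any (fun x => pvHitsI m x p q) then pvValN m p q else pvCell nm p q := by
  induction L generalizing nm with
  | nil => simp
  | cons x L ih =>
    obtain ⟨hx1, hx2⟩ := hL x (by simp)
    have hx : x = ((x.1.toNat : Int), (x.2.1.toNat : Int), x.2.2) := by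
      simp [Int.toNat_of_nonneg hx1, Int.toNat_of_nonneg hx2]
    rw [List.foldl_cons]
    rw [ih _ (by rw [hx]; exact pvShape_fA m nm _ _ _ hsh) (fun y hy => hL y (by simp [hy]))]
    rw [show pvFA m nm x = pvFA m nm ((x.1.toNat : Int), (x.2.1.toNat : Int), x.2.2) from by rw [← hx]]
    rw [pvCell_fA m nm _ _ _ p q hsh]
    simp only [List.any_cons, pvHitsI, Bool.or_eq_true]
    by_cases h1 : pvHits m x.1.toNat x.2.1.toNat x.2.2 p q = true
    · by_cases h2 : (L.any fun x => pvHits m x.1.toNat x.2.1.toNat x.2.2 p q) = true <;>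
        simp [h1, h2]
    · by_cases h2 : (L.any fun x => pvHits m x.1.toNat x.2.1.toNat x.2.2 p q) = true <;>
        simp [h1, h2]

lemma pvShape_foldA (m : List (List Int)) (L : List (Int × Int × Int)) (nm : List (List Int))
    (hsh : pvShape m nm) (hL : ∀ x ∈ L, 0 ≤ x.1 ∧ 0 ≤ x.2.1) :
    pvShape m (L.foldl (pvFA m) nm) := by
  induction L generalizing nm with
  | nil => exact hsh
  | cons x L ih =>
    obtain ⟨hx1, hx2⟩ := hL x (by simp)
    have hx : x = ((x.1.toNat : Int), (x.2.1.toNat : Int), x.2.2) := by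
      simp [Int.toNat_of_nonneg hx1, Int.toNat_of_nonneg hx2]
    rw [List.foldl_cons]
    exact ih _ (by rw [hx]; exact pvShape_fA m nm _ _ _ hsh) (fun y hy => hL y (by simp [hy]))

def pvFlat (m : List (List Int)) : List (Int × Int × Int) :=
  (PySem.List.enumerate m).flatMap (fun ir =>
    (PySem.List.enumerate ir.2).map (fun jc => (ir.1, jc.1, jc.2)))

lemma pvFoldA_flat (m nm0 : List (List Int)) :
    (PySem.List.enumerate m).foldl (fun acc ir =>
      (PySem.List.enumerate ir.2).foldl (fun acc2 jc =>
        if jc.2 ≠ 2 then acc2 else pvStepA m acc2 ir.1 jc.1) acc) nm0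
    = (pvFlat m).foldl (pvFA m) nm0 := by
  unfold pvFlat
  rw [List.foldl_flatMap]
  congr 1
  funext acc ir
  rw [List.foldl_map]
  rfl

lemma pvFlat_mem (m : List (List Int)) (x : Int × Int × Int) :
    x ∈ pvFlat m ↔ ∃ ip : Nat, ip < m.length ∧ ∃ jp : Nat, jp < (m.getD ip []).length ∧
      x = ((ip : Int), (jp : Int), (m.getD ip []).getD jp 0) := by
  unfold pvFlat
  rw [List.mem_flatMap]
  constructor
  · rintro ⟨ir, hir, hx⟩
    rw [PySem.List.mem_enumerate_iff] at hir
    obtain ⟨ip, hip, rfl⟩ := hir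
    rw [List.mem_map] at hx
    obtain ⟨jc, hjc, rfl⟩ := hx
    rw [PySem.List.mem_enumerate_iff] at hjc
    obtain ⟨jp, hjp, rfl⟩ := hjc
    exact ⟨ip, hip, jp, by simpa [List.getD_eq_getElem?_getD, List.getElem?_eq_getElem hip,
      List.getElem?_eq_getElem hjp] using hjp, by
        simp [List.getD_eq_getElem?_getD, List.getElem?_eq_getElem hip,
          List.getElem?_eq_getElem hjp]⟩
  · rintro ⟨ip, hip, jp, hjp, rfl⟩
    refine ⟨((ip : Int), m[ip]), ?_, ?_⟩
    · rw [PySem.List.mem_enumerate_iff]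
      exact ⟨ip, hip, by simp⟩
    · rw [List.mem_map]
      have hjp' : jp < m[ip].length := by
        simpa [List.getD_eq_getElem?_getD, List.getElem?_eq_getElem hip] using hjp
      refine ⟨((jp : Int), m[ip][jp]), ?_, ?_⟩
      · rw [PySem.List.mem_enumerate_iff]
        exact ⟨jp, hjp', by simp⟩
      · simp [List.getD_eq_getElem?_getD, List.getElem?_eq_getElem hip,
          List.getElem?_eq_getElem hjp']

lemma pvHits_iff (m : List (List Int)) (ip jp : Nat) (c : Int) (p q : Nat) :
    pvHits m ip jp c p q = true ↔
      c = 2 ∧ p < m.length ∧ q < (m.getD p []).length ∧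
        ((p + 1 = ip ∧ q = jp ∧ 1 ≤ ip) ∨
         (1 ≤ jp ∧ p = ip ∧ q + 1 = jp) ∨
         (jp + 1 < (m.getD ip []).length ∧ p = ip ∧ q = jp + 1) ∨
         (p = ip + 1 ∧ q = jp ∧ (ip = 0 ∨ ip + 1 ≠ m.length))) := by
  unfold pvHits
  split_ifs with h0 hl <;>
    simp only [Bool.and_eq_true, Bool.or_eq_true, decide_eq_true_eq, beq_iff_eq] <;> omega

lemma pvFlooded_iff (m : List (List Int)) (i j : Int) :
    pvFlooded m i j = true ↔ ∃ a b : Nat, i = (a : Int) ∧ j = (b : Int) ∧ a < m.length ∧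
      b < (m.getD a []).length ∧ (m.getD a []).getD b 0 = 2 := by
  unfold pvFlooded
  simp only [Bool.and_eq_true, decide_eq_true_eq, beq_iff_eq, PySem.List.len_eq]
  constructor
  · rintro ⟨⟨hi0, hin⟩, ⟨hj0, hjn⟩, hc⟩
    obtain ⟨a, rfl⟩ : ∃ a : Nat, i = (a : Int) := ⟨i.toNat, (Int.toNat_of_nonneg hi0).symm⟩
    rw [PySem.List.pyGetD_natCast] at hjn hc
    obtain ⟨b, rfl⟩ : ∃ b : Nat, j = (b : Int) := ⟨j.toNat, (Int.toNat_of_nonneg hj0).symm⟩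
    rw [PySem.List.pyGetD_natCast] at hc
    exact ⟨a, b, rfl, rfl, by omega, by omega, hc⟩
  · rintro ⟨a, b, rfl, rfl, han, hbn, hc⟩
    simp only [PySem.List.pyGetD_natCast]
    exact ⟨⟨by omega, by omega⟩, ⟨by omega, by omega⟩, hc⟩

lemma pvFlat_any (m : List (List Int)) (p q : Nat) (hp : p < m.length)
    (hq : q < (m.getD p []).length) :
    (pvFlat m).any (fun x => pvHitsI m x p q) =
      (pvFlooded m ((p : Int) - 1) (q : Int) || pvFlooded m ((p : Int) + 1) (q : Int) ||
       pvFlooded m (p : Int) ((q : Int) - 1) || pvFlooded m (p : Int) ((q : Int) + 1)) := by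
  rw [Bool.eq_iff_iff, List.any_eq_true]
  simp only [Bool.or_eq_true]
  constructor
  · rintro ⟨x, hx, hhit⟩
    rw [pvFlat_mem] at hx
    obtain ⟨ip, hip, jp, hjp, rfl⟩ := hx
    unfold pvHitsI at hhit
    simp only [Int.toNat_natCast] at hhit
    rw [pvHits_iff] at hhit
    obtain ⟨hc, -, -, hd⟩ := hhit
    rcases hd with ⟨h1, h2, h3⟩ | ⟨h1, h2, h3⟩ | ⟨h1, h2, h3⟩ | ⟨h1, h2, h3⟩
    · exact Or.inl (Or.inl (Or.inr ((pvFlooded_iff ..).mpr ⟨ip, jp, by omega, by omega, hip, hjp, hc⟩)))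
    · exact Or.inr ((pvFlooded_iff ..).mpr ⟨ip, jp, by omega, by omega, hip, hjp, hc⟩)
    · exact Or.inl (Or.inr ((pvFlooded_iff ..).mpr ⟨ip, jp, by omega, by omega, hip, hjp, hc⟩))
    · exact Or.inl (Or.inl (Or.inl ((pvFlooded_iff ..).mpr ⟨ip, jp, by omega, by omega, hip, hjp, hc⟩)))
  · rintro (((h | h) | h) | h) <;>
      [obtain ⟨a, b, ha, hb, han, hbn, hc⟩ := (pvFlooded_iff ..).mp h;
       obtain ⟨a, b, ha, hb, han, hbn, hc⟩ := (pvFlooded_iff ..).mp h;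
       obtain ⟨a, b, ha, hb, han, hbn, hc⟩ := (pvFlooded_iff ..).mp h;
       obtain ⟨a, b, ha, hb, han, hbn, hc⟩ := (pvFlooded_iff ..).mp h]
    · refine ⟨((a : Int), (b : Int), (m.getD a []).getD b 0),
        (pvFlat_mem ..).mpr ⟨a, han, b, hbn, rfl⟩, ?_⟩
      unfold pvHitsI
      simp only [Int.toNat_natCast]
      rw [pvHits_iff]
      exact ⟨hc, hp, hq, by omega⟩
    · refine ⟨((a : Int), (b : Int), (m.getD a []).getD b 0),
        (pvFlat_mem ..).mpr ⟨a, han, b, hbn, rfl⟩, ?_⟩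
      unfold pvHitsI
      simp only [Int.toNat_natCast]
      rw [pvHits_iff]
      exact ⟨hc, hp, hq, by omega⟩
    · obtain rfl : a = p := by omega
      refine ⟨((a : Int), (b : Int), (m.getD a []).getD b 0),
        (pvFlat_mem ..).mpr ⟨a, han, b, hbn, rfl⟩, ?_⟩
      unfold pvHitsI
      simp only [Int.toNat_natCast]
      rw [pvHits_iff]
      exact ⟨hc, hp, hq, by omega⟩
    · obtain rfl : a = p := by omega
      refine ⟨((a : Int), (b : Int), (m.getD a []).getD b 0),
        (pvFlat_mem ..).mpr ⟨a, han, b, hbn, rfl⟩, ?_⟩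
      unfold pvHitsI
      simp only [Int.toNat_natCast]
      rw [pvHits_iff]
      exact ⟨hc, hp, hq, by omega⟩

def pvBRow (m : List (List Int)) (i : Int) (row : List Int) : List Int :=
  (PySem.List.enumerate row).map (fun jc =>
    if (jc.2 == 0) && (pvFlooded m (i - 1) jc.1 || pvFlooded m (i + 1) jc.1 ||
                       pvFlooded m i (jc.1 - 1) || pvFlooded m i (jc.1 + 1))
    then 2 else jc.2)

lemma pvNewMap_eq (m : List (List Int)) :
    (pvFlat m).foldl (pvFA m) m =
      (PySem.List.enumerate m).map (fun ir => pvBRow m ir.1 ir.2) := by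
  have hsh0 : pvShape m m := ⟨rfl, fun _ => rfl⟩
  have hL : ∀ x ∈ pvFlat m, 0 ≤ x.1 ∧ 0 ≤ x.2.1 := by
    intro x hx
    rw [pvFlat_mem] at hx
    obtain ⟨ip, -, jp, -, rfl⟩ := hx
    exact ⟨Int.natCast_nonneg ip, Int.natCast_nonneg jp⟩
  have hshA := pvShape_foldA m (pvFlat m) m hsh0 hL
  have hlenB : ((PySem.List.enumerate m).map (fun ir => pvBRow m ir.1 ir.2)).length = m.length := by
    simp [PySem.List.length_enumerate]
  apply List.ext_getElem (by rw [hshA.1, hlenB])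
  intro p h1 h2
  have hp : p < m.length := by rw [hshA.1] at h1; exact h1
  have hrowB : ((PySem.List.enumerate m).map (fun ir => pvBRow m ir.1 ir.2))[p] =
      pvBRow m (p : Int) m[p] := by
    rw [List.getElem_map, PySem.List.getElem_enumerate]
    norm_num
  rw [hrowB]
  have hrowlenA : ((pvFlat m).foldl (pvFA m) m)[p].length = (m.getD p []).length := by
    have := hshA.2 p
    rwa [List.getD_eq_getElem _ _ h1] at this
  have hrowlenB : (pvBRow m (p : Int) m[p]).length = (m.getD p []).length := by
    rw [List.getD_eq_getElem _ _ hp]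
    simp [pvBRow, PySem.List.length_enumerate]
  apply List.ext_getElem (by rw [hrowlenA, hrowlenB])
  intro q hq1 hq2
  have hq : q < (m.getD p []).length := by rw [← hrowlenA]; exact hq1
  -- LHS as pvCell
  have hLHS : ((pvFlat m).foldl (pvFA m) m)[p][q] = pvCell ((pvFlat m).foldl (pvFA m) m) p q := by
    unfold pvCell
    rw [List.getD_eq_getElem _ _ h1, List.getD_eq_getElem _ _ hq1]
  -- RHS concrete
  have hqm : q < m[p].length := by
    rwa [List.getD_eq_getElem _ _ hp] at hq
  have hRHS : (pvBRow m (p : Int) m[p])[q] =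
      (if (m[p][q] == 0) && (pvFlooded m ((p : Int) - 1) (q : Int) || pvFlooded m ((p : Int) + 1) (q : Int) ||
          pvFlooded m (p : Int) ((q : Int) - 1) || pvFlooded m (p : Int) ((q : Int) + 1))
       then 2 else m[p][q]) := by
    unfold pvBRow
    rw [List.getElem_map, PySem.List.getElem_enumerate]
    norm_num
  rw [hLHS, hRHS, pvCell_foldA m (pvFlat m) m hsh0 hL p q, pvFlat_any m p q hp hq]
  have hcell : pvCell m p q = m[p][q] := by
    unfold pvCell
    rw [List.getD_eq_getElem _ _ hp, List.getD_eq_getElem _ _ hqm]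
  by_cases hnb : (pvFlooded m ((p : Int) - 1) (q : Int) || pvFlooded m ((p : Int) + 1) (q : Int) ||
      pvFlooded m (p : Int) ((q : Int) - 1) || pvFlooded m (p : Int) ((q : Int) + 1)) = true
  · rw [hnb]
    simp only [if_true, Bool.and_true]
    unfold pvValN
    rw [hcell]
    by_cases hc0 : m[p][q] = 0
    · simp [hc0]
    · simp [hc0]
  · rw [Bool.not_eq_true] at hnb
    rw [hnb]
    simp [hcell]

-- ===== VERDICT (by name: the statement is the Claim_ definition above) =====
theorem flooding_map_spec : Claim_equal_flooding_map := by
  intro map steps _dom _pre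
  unfold Spec_flooding_map
  simp only [flooding_map, flooding_map_alt]
  rw [PySem.List.foldl_append_singleton, List.nil_append, pvFoldA_flat, pvNewMap_eq]
  rfl
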